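-- pv_equiv track=rewrite | github.com/zifwang/599FinalProject | src/data_preparation.py | find_2_3_underscore_OD_file
-- ===== SOURCE A (Python) =====
-- def find_2_3_underscore_OD_file(string):
--     """
--         Function to find the second & third underscore's position in the string
--         Argument: string: a fileName contains more than 3 underscore
--         Return:
--             position_1: position of the second underscore
--             position_2: position of the third underscore
--     """
--     position_1 = 0
--     position_2 = 0
--     numberOfUnderscore = 0
--     for i in range (0,len(string)):
--         if(string[i] == '_'):
--             numberOfUnderscore += 1
--             if(numberOfUnderscore == 2):
--                 position_1 = i
--             if(numberOfUnderscore == 3):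
--                 position_2 = i
--                 break
--
--     return position_1,position_2
-- ===== SOURCE B (Python) =====
-- def find_2_3_underscore_OD_file(string):
--     idx = [i for i, c in enumerate(string) if c == '_']
--     position_1 = idx[1] if len(idx) >= 2 else 0
--     position_2 = idx[2] if len(idx) >= 3 else 0
--     return position_1, position_2
-- ===== Notes on version B (the rewrite author's own statement) =====
-- stated objective: simpler
-- what changed: Replaces the stateful counting loop with break by a precomputed list of all underscore positions plus direct indexing with defaults.
import Mathlib
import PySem

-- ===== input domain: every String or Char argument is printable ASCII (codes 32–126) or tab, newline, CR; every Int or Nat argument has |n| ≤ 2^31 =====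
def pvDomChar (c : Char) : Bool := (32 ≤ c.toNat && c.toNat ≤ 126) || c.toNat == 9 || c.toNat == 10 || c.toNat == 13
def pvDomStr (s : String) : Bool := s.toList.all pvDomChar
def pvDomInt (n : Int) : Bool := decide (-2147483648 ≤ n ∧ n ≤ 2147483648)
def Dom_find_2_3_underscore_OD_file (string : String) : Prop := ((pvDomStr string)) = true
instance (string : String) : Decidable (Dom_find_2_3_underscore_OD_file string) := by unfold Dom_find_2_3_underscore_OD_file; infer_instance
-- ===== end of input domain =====

-- B replaces A's counting loop with break by a precomputed list of underscore positions plus indexing with defaults (simpler decomposition, same cost).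

-- ===== PORT A =====
-- A's for-loop over indices with counter and break, as structural recursion over the chars.
def findLoopA : List Char → Int → Int → Int → Int → Int × Int
  | [], _, _, p1, p2 => (p1, p2)
  | c :: rest, i, n, p1, p2 =>
    if c = '_' then
      let n' := n + 1
      let p1' := if n' = 2 then i else p1
      if n' = 3 then (p1', i)   -- break
      else findLoopA rest (i + 1) n' p1' p2
    else findLoopA rest (i + 1) n p1 p2

def find_2_3_underscore_OD_file (string : String) : Int × Int :=
  findLoopA string.toList 0 0 0 0

-- ===== PORT B =====
-- idx = [i for i, c in enumerate(string) if c == '_']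
def find_2_3_underscore_OD_file_alt (string : String) : Int × Int :=
  let idx : List Int :=
    ((string.toList.zipIdx).filter (fun p => p.1 = '_')).map (fun p => (p.2 : Int))
  let position_1 : Int := if idx.length ≥ 2 then idx.getD 1 0 else 0
  let position_2 : Int := if idx.length ≥ 3 then idx.getD 2 0 else 0
  (position_1, position_2)

-- ===== PRECONDITION & SPEC =====
def Spec_find_2_3_underscore_OD_file (string : String) (out : Int × Int) : Prop := out = find_2_3_underscore_OD_file_alt string
instance (string : String) (out : Int × Int) : Decidable (Spec_find_2_3_underscore_OD_file string out) := by unfold Spec_find_2_3_underscore_OD_file; infer_instance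

-- ===== CLAIM (what is proved, stated in full; the proofs are below) =====
def Claim_equal_find_2_3_underscore_OD_file : Prop := ∀ (string : String), Dom_find_2_3_underscore_OD_file string → Spec_find_2_3_underscore_OD_file string (find_2_3_underscore_OD_file string)

-- ===== LEMMAS AND PROOFS =====

-- indices (as Int) of '_' in l, counting from offset i
def uidx : List Char → Int → List Int
  | [], _ => []
  | c :: r, i => if c = '_' then i :: uidx r (i + 1) else uidx r (i + 1)

theorem uidx_eq_filter (l : List Char) (k : Nat) :
    ((l.zipIdx k).filter (fun p => p.1 = '_')).map (fun p => (p.2 : Int)) = uidx l (k : Int) := by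
  induction l generalizing k with
  | nil => simp [uidx]
  | cons c r ih =>
    by_cases h : c = '_' <;>
      · simp [uidx, List.zipIdx_cons, h]
        exact_mod_cast ih (k + 1)

theorem loopA_two (l : List Char) (i p1 p2 : Int) :
    findLoopA l i 2 p1 p2 = (p1, (uidx l i).getD 0 p2) := by
  induction l generalizing i with
  | nil => simp [findLoopA, uidx]
  | cons c r ih =>
    by_cases h : c = '_' <;> simp [findLoopA, uidx, h, ih]

theorem loopA_one (l : List Char) (i p1 p2 : Int) :
    findLoopA l i 1 p1 p2 = ((uidx l i).getD 0 p1, (uidx l i).getD 1 p2) := by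
  induction l generalizing i with
  | nil => simp [findLoopA, uidx]
  | cons c r ih =>
    by_cases h : c = '_' <;> simp [findLoopA, uidx, h, ih, loopA_two]

theorem loopA_zero (l : List Char) (i p1 p2 : Int) :
    findLoopA l i 0 p1 p2 = ((uidx l i).getD 1 p1, (uidx l i).getD 2 p2) := by
  induction l generalizing i with
  | nil => simp [findLoopA, uidx]
  | cons c r ih =>
    by_cases h : c = '_' <;> simp [findLoopA, uidx, h, ih, loopA_one]

theorem getD_of_length_lt {α : Type} (l : List α) (n : Nat) (d : α) (h : l.length ≤ n) :
    l.getD n d = d := by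
  simp [List.getD, List.getElem?_eq_none (by omega : l.length ≤ n)]

-- ===== VERDICT (by name: the statement is the Claim_ definition above) =====
theorem find_2_3_underscore_OD_file_spec : Claim_equal_find_2_3_underscore_OD_file := by
  intro s _
  unfold Spec_find_2_3_underscore_OD_file find_2_3_underscore_OD_file find_2_3_underscore_OD_file_alt
  rw [loopA_zero]
  have h := uidx_eq_filter s.toList 0
  simp only [Int.natCast_zero] at h
  show _ = (_, _)
  rw [show ((s.toList.zipIdx).filter (fun p => p.1 = '_')) = ((s.toList.zipIdx 0).filter (fun p => p.1 = '_')) from rfl, h]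
  generalize uidx s.toList 0 = u
  refine Prod.ext ?_ ?_ <;> simp only
  · split_ifs with h2
    · rfl
    · exact getD_of_length_lt u 1 0 (by omega)
  · split_ifs with h3
    · rfl
    · exact getD_of_length_lt u 2 0 (by omega)
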